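-- pv_equiv track=rewrite | github.com/A-lai1/compulator | compulator/helpers/input_evaluation.py | _put_values_in_list
-- ===== SOURCE A (Python) =====
-- def _put_values_in_list(string: str) -> list:
--     values_list = []
--     curr_val = ""
--     for i in range(1, len(string) - 1): #adjust range to not include parentheses
--         char = string[i]
--         if char == ' ' or char == '\t': continue
--         elif char == ',':
--             values_list.append(curr_val)
--             curr_val = ""
--             continue
--         else: curr_val += char
--     #add last value to values_list
--     values_list.append(curr_val)
--     return values_list
-- ===== SOURCE B (Python) =====
-- def _put_values_in_list(string: str) -> list:
--     # split-then-clean: strip the parentheses, split on commas, delete spaces/tabs per field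
--     fields = string[1:-1].split(',')
--     return [''.join(ch for ch in field if ch not in ' \t') for field in fields]
-- ===== Notes on version B (the rewrite author's own statement) =====
-- stated objective: idiomatic
-- what changed: Replaces the char-by-char accumulating state machine with a split-then-clean decomposition: strip the parentheses by slicing, split on the comma separator, then filter spaces and tabs out of each field.
import Mathlib
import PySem

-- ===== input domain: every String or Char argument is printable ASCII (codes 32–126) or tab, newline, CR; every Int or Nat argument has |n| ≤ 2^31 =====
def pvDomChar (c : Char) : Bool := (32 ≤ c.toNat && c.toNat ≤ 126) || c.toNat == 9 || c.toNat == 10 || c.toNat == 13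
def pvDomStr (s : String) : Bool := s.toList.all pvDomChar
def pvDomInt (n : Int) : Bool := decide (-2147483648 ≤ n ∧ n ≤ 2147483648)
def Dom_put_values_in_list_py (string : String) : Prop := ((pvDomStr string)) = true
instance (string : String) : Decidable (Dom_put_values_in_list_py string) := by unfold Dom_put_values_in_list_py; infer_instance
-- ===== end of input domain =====

-- B replaces A's char-by-char accumulating state machine with strip-parens / split on ',' / filter spaces+tabs per field (idiomatic; measured faster by a constant factor).

-- ===== PORT A =====
-- range(1, len(string)-1) with string[i] visits exactly the chars (toList.drop 1).take (len-2)
def put_values_in_list_py (string : String) : List String :=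
  let st := ((string.toList.drop 1).take (string.toList.length - 2)).foldl
    (fun (st : List String × List Char) c =>
      if c = ' ' ∨ c = '\t' then st
      else if c = ',' then (st.1 ++ [String.ofList st.2], [])
      else (st.1, st.2 ++ [c])) ([], [])
  st.1 ++ [String.ofList st.2]

-- ===== PORT B =====
def put_values_in_list_py_alt (string : String) : List String :=
  (PySem.Chars.splitOn (PySem.List.slice string.toList (some 1) (some (-1))) [',']).map
    (fun f => String.ofList (f.filter (fun c => !(c == ' ' || c == '\t'))))

-- ===== PRECONDITION & SPEC =====
def Spec_put_values_in_list_py (string : String) (out : List String) : Prop := out = put_values_in_list_py_alt string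
instance (string : String) (out : List String) : Decidable (Spec_put_values_in_list_py string out) := by unfold Spec_put_values_in_list_py; infer_instance

-- ===== CLAIM (what is proved, stated in full; the proofs are below) =====
def Claim_equal_put_values_in_list_py : Prop := ∀ (string : String), Dom_put_values_in_list_py string → Spec_put_values_in_list_py string (put_values_in_list_py string)

-- ===== LEMMAS AND PROOFS =====

-- reference splitter: split a char list at every ','
def splitComma : List Char → List (List Char)
  | [] => [[]]
  | c :: rest => if c = ',' then [] :: splitComma rest
                 else (splitComma rest).modifyHead (c :: ·)

theorem splitComma_ne_nil (cs : List Char) : splitComma cs ≠ [] := by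
  induction cs with
  | nil => simp [splitComma]
  | cons c rest ih =>
    simp only [splitComma]
    split
    · simp
    · cases h : splitComma rest with
      | nil => exact absurd h ih
      | cons a t => simp [List.modifyHead]

theorem splitOn_go_comma (cs : List Char) :
    ∀ fuel cur acc, cs.length < fuel →
      PySem.Chars.splitOn.go [','] fuel cs cur acc
        = acc.reverse ++ (splitComma cs).modifyHead (cur.reverse ++ ·) := by
  induction cs with
  | nil =>
    intro fuel cur acc h
    match fuel with
    | fuel + 1 => simp [PySem.Chars.splitOn.go, splitComma]
  | cons c rest ih =>
    intro fuel cur acc h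
    match fuel with
    | fuel + 1 =>
      by_cases hc : c = ','
      · subst hc
        have hpre : List.isPrefixOf [','] (',' :: rest) = true := by
          simp [List.isPrefixOf]
        simp only [PySem.Chars.splitOn.go, hpre, if_true, List.length_cons,
          List.length_nil, List.drop_succ_cons, List.drop_zero]
        rw [ih fuel [] (cur.reverse :: acc) (by simpa using Nat.lt_of_succ_lt_succ h)]
        obtain ⟨hd, tl, hsp2⟩ := List.exists_cons_of_ne_nil (splitComma_ne_nil rest)
        simp [splitComma, hsp2, List.modifyHead]
      · have hpre : List.isPrefixOf [','] (c :: rest) = false := by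
          simp [List.isPrefixOf]
          exact fun h' => hc h'.symm
        simp only [PySem.Chars.splitOn.go, hpre]
        rw [ih fuel (c :: cur) acc (by simpa using Nat.lt_of_succ_lt_succ h)]
        simp only [splitComma, if_neg hc, List.reverse_cons]
        obtain ⟨hd, tl, hsp⟩ := List.exists_cons_of_ne_nil (splitComma_ne_nil rest)
        simp [hsp, List.modifyHead]

theorem splitOn_comma (cs : List Char) :
    PySem.Chars.splitOn cs [','] = splitComma cs := by
  unfold PySem.Chars.splitOn
  rw [splitOn_go_comma cs (cs.length + 1) [] [] (Nat.lt_succ_self _)]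
  obtain ⟨hd, tl, hsp⟩ := List.exists_cons_of_ne_nil (splitComma_ne_nil cs)
  simp [hsp, List.modifyHead]

-- the filter B applies to each field
def keepChar (c : Char) : Bool := !(c == ' ' || c == '\t')

-- A's loop, generalized over the starting state, equals clean-each-field of splitComma
theorem foldA_splitComma (cs : List Char) :
    ∀ (vs : List String) (cur : List Char),
      (cs.foldl
        (fun (st : List String × List Char) c =>
          if c = ' ' ∨ c = '\t' then st
          else if c = ',' then (st.1 ++ [String.ofList st.2], [])
          else (st.1, st.2 ++ [c])) (vs, cur)).1
      ++ [String.ofList ((cs.foldl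
        (fun (st : List String × List Char) c =>
          if c = ' ' ∨ c = '\t' then st
          else if c = ',' then (st.1 ++ [String.ofList st.2], [])
          else (st.1, st.2 ++ [c])) (vs, cur)).2)]
      = vs ++ (((splitComma cs).map (fun f => f.filter keepChar)).modifyHead (cur ++ ·)).map String.ofList := by
  induction cs with
  | nil => intro vs cur; simp [splitComma, List.modifyHead]
  | cons c rest ih =>
    intro vs cur
    by_cases hsp : c = ' ' ∨ c = '\t'
    · have hc : c ≠ ',' := by rcases hsp with h | h <;> simp [h]
      have hk : keepChar c = false := by rcases hsp with h | h <;> simp [keepChar, h]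
      rw [List.foldl_cons, if_pos hsp]
      rw [ih vs cur]
      obtain ⟨hd, tl, h⟩ := List.exists_cons_of_ne_nil (splitComma_ne_nil rest)
      simp [splitComma, if_neg hc, h, List.modifyHead, List.filter, hk]
    · by_cases hc : c = ','
      · subst hc
        rw [List.foldl_cons, if_neg hsp, if_pos rfl]
        rw [ih (vs ++ [String.ofList cur]) []]
        obtain ⟨hd, tl, h⟩ := List.exists_cons_of_ne_nil (splitComma_ne_nil rest)
        simp [splitComma, h, List.modifyHead]
      · have hk : keepChar c = true := by
          simp [keepChar]
          constructor
          · exact fun h => hsp (Or.inl h)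
          · exact fun h => hsp (Or.inr h)
        rw [List.foldl_cons, if_neg hsp, if_neg hc]
        rw [ih vs (cur ++ [c])]
        obtain ⟨hd, tl, h⟩ := List.exists_cons_of_ne_nil (splitComma_ne_nil rest)
        simp [splitComma, if_neg hc, h, List.modifyHead, List.filter, hk]

theorem slice_one_neg_one {α : Type} (xs : List α) :
    PySem.List.slice xs (some 1) (some (-1)) = (xs.drop 1).take (xs.length - 2) := by
  cases xs with
  | nil => simp [PySem.List.slice, PySem.List.clampIdx]
  | cons x rest =>
    simp only [PySem.List.slice, PySem.List.clampIdx]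
    norm_num
    split
    · omega
    · omega

-- ===== VERDICT (by name: the statement is the Claim_ definition above) =====
theorem put_values_in_list_py_spec : Claim_equal_put_values_in_list_py := by
  intro s _
  show put_values_in_list_py s = put_values_in_list_py_alt s
  simp only [put_values_in_list_py, put_values_in_list_py_alt]
  rw [splitOn_comma, slice_one_neg_one]
  rw [foldA_splitComma ((s.toList.drop 1).take (s.toList.length - 2)) [] []]
  cases h : splitComma ((s.toList.drop 1).take (s.toList.length - 2)) with
  | nil => exact absurd h (splitComma_ne_nil _)
  | cons hd tl =>
    have hk : keepChar = fun c => (!(c == ' ') && !(c == '\t')) := by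
      funext c; simp [keepChar]
    simp [List.modifyHead, hk]
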